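-- pv_equiv track=rewrite | github.com/idealmundo/noodles | newLife.py | findMoving
-- ===== SOURCE A (Python) =====
-- def findMoving(staticList):
--     backlist = []
--     movingPoints = []
--     for points in staticList:
--         backlist.append(points)
--     backlist.reverse()
--     for step in [6]:
--         tempList = []
--         for point in backlist[0]:
--             for l in range(step,len(backlist),step):
--                 if point not in backlist[l] and point not in movingPoints:
--                     movingPoints.append(point)
--     return movingPoints
-- ===== SOURCE B (Python) =====
-- def findMoving(staticList):
--     backlist = staticList[::-1]
--     movingPoints = []
--     if len(backlist) > 6:
--         common = list(backlist[6])
--         for l in range(12, len(backlist), 6):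
--             common = [p for p in common if p in backlist[l]]
--         for p in backlist[0]:
--             if p not in common and p not in movingPoints:
--                 movingPoints.append(p)
--     return movingPoints
-- ===== Notes on version B (the rewrite author's own statement) =====
-- stated objective: alternative
-- what changed: B first intersects the sampled frames once into a list `common` (empty result if there are no sampled frames), then makes a single pass over the first frame appending points outside `common`, instead of A's per-point rescan of every sampled frame; on point-heavy inputs this avoids rescanning frames per point.
import Mathlib
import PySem

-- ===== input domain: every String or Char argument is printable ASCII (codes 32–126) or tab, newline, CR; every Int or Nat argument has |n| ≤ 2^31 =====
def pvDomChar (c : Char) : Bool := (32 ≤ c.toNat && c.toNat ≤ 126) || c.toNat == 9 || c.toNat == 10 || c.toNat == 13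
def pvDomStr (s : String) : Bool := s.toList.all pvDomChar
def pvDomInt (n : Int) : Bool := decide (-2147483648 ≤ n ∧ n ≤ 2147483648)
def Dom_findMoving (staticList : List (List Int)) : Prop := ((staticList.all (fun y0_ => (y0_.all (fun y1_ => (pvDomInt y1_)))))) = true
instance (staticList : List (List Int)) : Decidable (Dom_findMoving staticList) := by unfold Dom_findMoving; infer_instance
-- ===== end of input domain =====

-- B intersects the sampled later frames once, then filters the first frame in a single pass,
-- instead of A's per-point rescan of every sampled frame.

-- ===== PORT A =====
-- literal transliteration of A: copy staticList into backlist, reverse it, then the triple loop.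
-- backlist[0] raises IndexError on the empty list (excluded by Pre_); pyGetD with default []
-- is exact on all admitted inputs (index 0 in range, and every l from the range is < length).
def findMoving (staticList : List (List Int)) : List Int :=
  let backlist := (staticList.foldl (fun acc points => acc ++ [points]) []).reverse
  [(6 : Int)].foldl (fun movingPoints step =>
    (PySem.List.pyGetD backlist 0 []).foldl (fun mp point =>
      (PySem.List.pyRange step backlist.length step).foldl (fun mp l =>
        if point ∉ PySem.List.pyGetD backlist l [] ∧ point ∉ mp then mp ++ [point] else mp)
        mp)
      movingPoints)
    []

-- ===== PORT B =====
-- transliteration of Source B: build `common` (intersection of sampled frames) once, then one pass.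
def findMoving_alt (staticList : List (List Int)) : List Int :=
  let backlist := staticList.reverse
  if backlist.length > 6 then
    let common := (PySem.List.pyRange 12 backlist.length 6).foldl
      (fun c l => c.filter (fun p => decide (p ∈ PySem.List.pyGetD backlist l [])))
      (PySem.List.pyGetD backlist 6 [])
    (PySem.List.pyGetD backlist 0 []).foldl
      (fun mp p => if p ∉ common ∧ p ∉ mp then mp ++ [p] else mp) []
  else []

-- ===== PRECONDITION & SPEC =====
-- Pre_ excludes only the empty list, on which Python A raises IndexError at backlist[0].
def Pre_findMoving (staticList : List (List Int)) : Prop := staticList ≠ []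
instance (staticList : List (List Int)) : Decidable (Pre_findMoving staticList) := by
  unfold Pre_findMoving; infer_instance
def pvWitness_findMoving : List (List Int) := [[1, 2], [2], [3]]

def Spec_findMoving (staticList : List (List Int)) (out : List Int) : Prop :=
  out = findMoving_alt staticList
instance (staticList : List (List Int)) (out : List Int) : Decidable (Spec_findMoving staticList out) := by
  unfold Spec_findMoving; infer_instance

-- ===== CLAIM (what is proved, stated in full; the proofs are below) =====
def Claim_equal_findMoving : Prop := ∀ (staticList : List (List Int)), Dom_findMoving staticList → Pre_findMoving staticList → Spec_findMoving staticList (findMoving staticList)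

-- ===== LEMMAS AND PROOFS =====

-- A's explicit copy loop builds the same list.
theorem pv_copy_eq (xs acc : List (List Int)) :
    xs.foldl (fun acc points => acc ++ [points]) acc = acc ++ xs := by
  induction xs generalizing acc with
  | nil => simp
  | cons x xs ih => simp [List.foldl, ih]

-- membership in B's iterated filter = membership in the seed and in every sampled frame
theorem pv_fold_filter_mem (L : List (List Int)) (idxs : List Int) (c : List Int) (p : Int) :
    p ∈ idxs.foldl
        (fun c l => c.filter (fun q => decide (q ∈ PySem.List.pyGetD L l []))) c ↔
      p ∈ c ∧ ∀ l ∈ idxs, p ∈ PySem.List.pyGetD L l [] := by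
  induction idxs generalizing c with
  | nil => simp
  | cons l rest ih =>
      simp only [List.foldl_cons, ih, List.mem_filter, decide_eq_true_eq,
        List.forall_mem_cons]
      tauto

-- once the point is in the accumulator, A's inner loop never changes it
theorem pv_inner_stay (L : List (List Int)) (point : Int) (idxs : List Int) (mp : List Int)
    (h : point ∈ mp) :
    idxs.foldl
      (fun mp l => if point ∉ PySem.List.pyGetD L l [] ∧ point ∉ mp then mp ++ [point] else mp)
      mp = mp := by
  induction idxs with
  | nil => rfl
  | cons l rest ih =>
      rw [List.foldl_cons, if_neg (by tauto : ¬ (point ∉ PySem.List.pyGetD L l [] ∧ point ∉ mp))]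
      exact ih

-- closed form of A's inner loop over the sampled indices
theorem pv_inner_char (L : List (List Int)) (point : Int) (idxs : List Int) (mp : List Int) :
    idxs.foldl
      (fun mp l => if point ∉ PySem.List.pyGetD L l [] ∧ point ∉ mp then mp ++ [point] else mp)
      mp =
    if point ∉ mp ∧ ∃ l ∈ idxs, point ∉ PySem.List.pyGetD L l [] then mp ++ [point] else mp := by
  induction idxs generalizing mp with
  | nil => simp
  | cons l rest ih =>
      by_cases hmp : point ∈ mp
      · rw [if_neg (by tauto)]
        simp only [List.foldl_cons, if_neg (by tauto : ¬ (point ∉ PySem.List.pyGetD L l [] ∧ point ∉ mp))]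
        exact pv_inner_stay L point rest mp hmp
      · by_cases hl : point ∈ PySem.List.pyGetD L l []
        · simp only [List.foldl_cons, if_neg (by tauto : ¬ (point ∉ PySem.List.pyGetD L l [] ∧ point ∉ mp))]
          rw [ih]
          by_cases he : ∃ x ∈ rest, point ∉ PySem.List.pyGetD L x []
          · rw [if_pos ⟨hmp, he⟩, if_pos]
            exact ⟨hmp, by rcases he with ⟨x, hx, hpx⟩; exact ⟨x, List.mem_cons_of_mem _ hx, hpx⟩⟩
          · rw [if_neg (fun hh => he hh.2), if_neg]
            rintro ⟨-, x, hx, hpx⟩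
            rcases List.mem_cons.mp hx with rfl | hx
            · exact hpx hl
            · exact he ⟨x, hx, hpx⟩
        · simp only [List.foldl_cons, if_pos (⟨hl, hmp⟩ : point ∉ PySem.List.pyGetD L l [] ∧ point ∉ mp)]
          rw [pv_inner_stay L point rest _ (by simp), if_pos]
          exact ⟨hmp, l, List.mem_cons_self, hl⟩

-- the two outer folds agree, given the membership bridge for `common`
theorem pv_outer_eq (L : List (List Int)) (common : List Int)
    (hc : ∀ p : Int, p ∉ common ↔ ∃ l ∈ PySem.List.pyRange 6 L.length 6,
            p ∉ PySem.List.pyGetD L l []) :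
    ∀ (first mp : List Int),
      first.foldl (fun mp point =>
        (PySem.List.pyRange 6 L.length 6).foldl
          (fun mp l => if point ∉ PySem.List.pyGetD L l [] ∧ point ∉ mp then mp ++ [point] else mp)
          mp) mp =
      first.foldl (fun mp p => if p ∉ common ∧ p ∉ mp then mp ++ [p] else mp) mp := by
  intro first
  induction first with
  | nil => intro mp; rfl
  | cons p rest ih =>
      intro mp
      simp only [List.foldl_cons]
      rw [pv_inner_char]
      have : (if p ∉ mp ∧ ∃ l ∈ PySem.List.pyRange 6 L.length 6, p ∉ PySem.List.pyGetD L l []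
              then mp ++ [p] else mp) =
             (if p ∉ common ∧ p ∉ mp then mp ++ [p] else mp) := by
        by_cases hmp : p ∈ mp
        · rw [if_neg (by tauto), if_neg (by tauto)]
        · by_cases hcm : p ∈ common
          · rw [if_neg (fun hh => ((hc p).mpr hh.2) hcm), if_neg (by tauto)]
          · rw [if_pos ⟨hmp, (hc p).mp hcm⟩, if_pos ⟨hcm, hmp⟩]
      rw [this, ih]

-- the sampled index set {6, 12, 18, …} splits as 6 :: {12, 18, …} (as a membership statement)
theorem pv_range_split (b : Int) (hb : 6 < b) (l : Int) :
    l ∈ PySem.List.pyRange 6 b 6 ↔ l = 6 ∨ l ∈ PySem.List.pyRange 12 b 6 := by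
  rw [PySem.List.mem_pyRange_iff_of_pos (by norm_num), PySem.List.mem_pyRange_iff_of_pos (by norm_num)]
  omega

theorem pv_range6_nil (b : Int) (hb : ¬ 6 < b) : PySem.List.pyRange 6 b 6 = [] := by
  rw [PySem.List.pyRange_of_pos _ _ (by norm_num : (0:Int) < 6), if_neg hb]
  simp

-- ===== VERDICT (by name: the statement is the Claim_ definition above) =====
theorem findMoving_spec : Claim_equal_findMoving := by
  intro staticList _ _
  unfold Spec_findMoving findMoving findMoving_alt
  simp only [pv_copy_eq, List.nil_append, List.foldl_cons, List.foldl_nil]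
  set L := staticList.reverse with hL
  by_cases hlen : L.length > 6
  · have hlenI : (6:Int) < (L.length : Int) := by exact_mod_cast hlen
    rw [if_pos hlen]
    apply pv_outer_eq
    intro p
    rw [pv_fold_filter_mem]
    constructor
    · intro h
      by_cases h6 : p ∈ PySem.List.pyGetD L 6 []
      · have : ∃ l ∈ PySem.List.pyRange 12 L.length 6, p ∉ PySem.List.pyGetD L l [] := by
          by_contra hno
          push Not at hno
          exact h ⟨h6, hno⟩
        rcases this with ⟨l, hl, hpl⟩
        exact ⟨l, (pv_range_split _ hlenI l).mpr (Or.inr hl), hpl⟩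
      · exact ⟨6, (pv_range_split _ hlenI 6).mpr (Or.inl rfl), h6⟩
    · rintro ⟨l, hl, hpl⟩ ⟨h6, hall⟩
      rcases (pv_range_split _ hlenI l).mp hl with rfl | hl'
      · exact hpl h6
      · exact hpl (hall l hl')
  · have hlenI : ¬ (6:Int) < (L.length : Int) := by exact_mod_cast hlen
    rw [if_neg hlen, pv_range6_nil _ hlenI]
    simp
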